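-- pv_equiv track=rewrite | github.com/Samk104/DSA-Problems | Company-Specific/Amazon/maxTransferRate.py | maxTransferRate
-- ===== SOURCE A (Python) =====
-- from typing import List
--
-- def maxTransferRate(throughput: List[int], pipelineCount: int) -> int:
--   tLen = len(throughput)
--   throughput.sort()
--
--   res = 0
--   pair = set()
--   pCount = 0
--
--   for i in range(tLen - 1, 0, -1):
--     if pCount == pipelineCount:
--       return res
--
--     if pCount < pipelineCount:
--       pair.add((i, i))
--       res += 2 * throughput[i]
--       pCount += 1
--
--     if pCount < pipelineCount and (i, i-1) not in pair:
--       pair.add((i, i-1))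
--       res += throughput[i] + throughput[i-1]
--       pCount += 1
--
--     if pCount < pipelineCount and (i-1, i) not in pair:
--       pair.add((i-1, i))
--       res += throughput[i-1] + throughput[i]
--       pCount += 1
--
--   return res
-- ===== SOURCE B (Python) =====
-- from typing import List
--
-- def maxTransferRate(throughput: List[int], pipelineCount: int) -> int:
--   # Block/divmod computation: each sorted index i (descending) contributes up to
--   # three allocations worth 4*t[i] + 2*t[i-1]; take q full blocks and a partial one.
--   # Sorts `throughput` in place, like the original.
--   throughput.sort()
--   n = len(throughput)
--   m = min(pipelineCount, 3 * (n - 1))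
--   if m <= 0:
--     return 0
--   q, r = divmod(m, 3)
--   total = 0
--   i = n - 1
--   for _ in range(q):
--     total += 4 * throughput[i] + 2 * throughput[i - 1]
--     i -= 1
--   if r >= 1:
--     total += 2 * throughput[i]
--   if r == 2:
--     total += throughput[i] + throughput[i - 1]
--   return total
-- ===== Notes on version B (the rewrite author's own statement) =====
-- stated objective: simpler
-- what changed: Replaces A's per-allocation loop with early exit, a per-step counter and a dead 'pair' set by a closed-form cap m = min(pipelineCount, 3*(n-1)) and a divmod(m,3) split: q full blocks of 4*t[i]+2*t[i-1] over the top q indices plus one partial block.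
import Mathlib
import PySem

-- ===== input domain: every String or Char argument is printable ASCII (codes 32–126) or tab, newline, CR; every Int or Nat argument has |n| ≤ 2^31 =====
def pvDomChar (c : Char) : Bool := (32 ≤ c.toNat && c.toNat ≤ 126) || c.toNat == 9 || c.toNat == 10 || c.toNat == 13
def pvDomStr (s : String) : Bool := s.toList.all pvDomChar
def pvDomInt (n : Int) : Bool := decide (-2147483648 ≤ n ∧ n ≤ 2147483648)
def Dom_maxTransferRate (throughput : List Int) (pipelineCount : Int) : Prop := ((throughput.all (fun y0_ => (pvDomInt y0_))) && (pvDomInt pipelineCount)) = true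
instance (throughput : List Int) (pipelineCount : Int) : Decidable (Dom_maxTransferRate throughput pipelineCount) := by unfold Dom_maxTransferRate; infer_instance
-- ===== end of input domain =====

-- B replaces A's per-allocation early-exit loop (and its dead `pair` set) by a divmod block
-- computation over the top q sorted indices plus a partial block (objective: simpler/faster loop shape).
-- Both Pythons sort `throughput` in place; the equivalence proved here is about the return value.

-- ===== PORT A =====
-- loop body of A: state = (res, pair, pCount, early-return value if any).
-- indices i fed by range(tLen-1, 0, -1) always satisfy 1 ≤ i < len, so throughput[i] and
-- throughput[i-1] never raise; pyGetD's default 0 is never used.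
def pvStepA (t : List Int) (pipelineCount : Int)
    (st : Int × PySem.Set (Int × Int) × Int × Option Int) (i : Int) :
    Int × PySem.Set (Int × Int) × Int × Option Int :=
  match st with
  | (res, pair, pCount, some r) => (res, pair, pCount, some r)
  | (res, pair, pCount, none) =>
    if pCount = pipelineCount then (res, pair, pCount, some res)
    else
      let s1 : Int × PySem.Set (Int × Int) × Int :=
        if pCount < pipelineCount then
          (res + 2 * PySem.List.pyGetD t i 0, PySem.Set.add pair (i, i), pCount + 1)
        else (res, pair, pCount)
      let s2 : Int × PySem.Set (Int × Int) × Int :=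
        if s1.2.2 < pipelineCount ∧ (i, i - 1) ∉ s1.2.1 then
          (s1.1 + (PySem.List.pyGetD t i 0 + PySem.List.pyGetD t (i - 1) 0),
           PySem.Set.add s1.2.1 (i, i - 1), s1.2.2 + 1)
        else s1
      let s3 : Int × PySem.Set (Int × Int) × Int :=
        if s2.2.2 < pipelineCount ∧ (i - 1, i) ∉ s2.2.1 then
          (s2.1 + (PySem.List.pyGetD t (i - 1) 0 + PySem.List.pyGetD t i 0),
           PySem.Set.add s2.2.1 (i - 1, i), s2.2.2 + 1)
        else s2
      (s3.1, s3.2.1, s3.2.2, none)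

def maxTransferRate (throughput : List Int) (pipelineCount : Int) : Int :=
  let tLen : Int := throughput.length
  let t := PySem.List.sorted throughput (fun x => x) false
  let st := (PySem.List.pyRange (tLen - 1) 0 (-1)).foldl (pvStepA t pipelineCount)
    (0, PySem.Set.empty, 0, none)
  match st.2.2.2 with
  | some r => r
  | none => st.1

-- ===== PORT B =====
-- loop body of B: state = (total, i); one full block of three allocations at index i.
def pvStepB (t : List Int) (st : Int × Int) (_j : Int) : Int × Int :=
  (st.1 + 4 * PySem.List.pyGetD t st.2 0 + 2 * PySem.List.pyGetD t (st.2 - 1) 0, st.2 - 1)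

def maxTransferRate_alt (throughput : List Int) (pipelineCount : Int) : Int :=
  let t := PySem.List.sorted throughput (fun x => x) false
  let n : Int := t.length
  let m := min pipelineCount (3 * (n - 1))
  if m ≤ 0 then 0
  else
    let q := PySem.Int.floordiv m 3
    let r := PySem.Int.mod m 3
    let st := (PySem.List.pyRange 0 q 1).foldl (pvStepB t) (0, n - 1)
    let total := if 1 ≤ r then st.1 + 2 * PySem.List.pyGetD t st.2 0 else st.1
    if r = 2 then total + PySem.List.pyGetD t st.2 0 + PySem.List.pyGetD t (st.2 - 1) 0 else total

-- ===== PRECONDITION & SPEC =====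
def Spec_maxTransferRate (throughput : List Int) (pipelineCount : Int) (out : Int) : Prop := out = maxTransferRate_alt throughput pipelineCount
instance (throughput : List Int) (pipelineCount : Int) (out : Int) : Decidable (Spec_maxTransferRate throughput pipelineCount out) := by unfold Spec_maxTransferRate; infer_instance

-- ===== CLAIM (what is proved, stated in full; the proofs are below) =====
def Claim_equal_maxTransferRate : Prop := ∀ (throughput : List Int) (pipelineCount : Int), Dom_maxTransferRate throughput pipelineCount → Spec_maxTransferRate throughput pipelineCount (maxTransferRate throughput pipelineCount)

-- ===== LEMMAS AND PROOFS =====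

-- Common greedy model: walk the index list with remaining budget k, consuming up to 3 per index.
def pvG (t : List Int) : List Int → Int → Int → Int
  | [], _, acc => acc
  | i :: L, k, acc =>
    if 3 ≤ k then pvG t L (k - 3) (acc + 4 * PySem.List.pyGetD t i 0 + 2 * PySem.List.pyGetD t (i - 1) 0)
    else if k = 2 then acc + 3 * PySem.List.pyGetD t i 0 + PySem.List.pyGetD t (i - 1) 0
    else if k = 1 then acc + 2 * PySem.List.pyGetD t i 0
    else acc

theorem pvG_nonpos (t : List Int) (L : List Int) (k acc : Int) (hk : k ≤ 0) :
    pvG t L k acc = acc := by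
  cases L with
  | nil => rfl
  | cons i L =>
    simp only [pvG]
    rw [if_neg (by omega), if_neg (by omega), if_neg (by omega)]

-- B's fold ignores the range elements: it is plain iteration, length many times.
def pvIter (t : List Int) : Nat → Int × Int → Int × Int
  | 0, st => st
  | q + 1, st => pvIter t q (pvStepB t st 0)

theorem foldl_stepB_eq_pvIter (t : List Int) (L : List Int) (st : Int × Int) :
    L.foldl (pvStepB t) st = pvIter t L.length st := by
  induction L generalizing st with
  | nil => rfl
  | cons j L ih =>
    rw [List.foldl_cons, List.length_cons]
    exact ih _

-- B's arithmetic, as a function of the top index (as a Nat) and the budget.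
def pvAlt (t : List Int) (k : Nat) (p acc : Int) : Int :=
  let m := min p (3 * (k : Int))
  if m ≤ 0 then acc
  else
    let q := PySem.Int.floordiv m 3
    let r := PySem.Int.mod m 3
    let st := pvIter t q.toNat (acc, (k : Int))
    let total := if 1 ≤ r then st.1 + 2 * PySem.List.pyGetD t st.2 0 else st.1
    if r = 2 then total + PySem.List.pyGetD t st.2 0 + PySem.List.pyGetD t (st.2 - 1) 0 else total

theorem alt_eq_pvAlt (throughput : List Int) (p : Int) :
    maxTransferRate_alt throughput p
      = pvAlt (PySem.List.sorted throughput (fun x => x) false)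
              ((((PySem.List.sorted throughput (fun x => x) false).length : Int) - 1).toNat) p 0 := by
  set t := PySem.List.sorted throughput (fun x => x) false with ht
  simp only [maxTransferRate_alt, pvAlt, foldl_stepB_eq_pvIter, PySem.List.length_pyRange_one, ← ht,
    Int.sub_zero]
  rcases Nat.eq_zero_or_pos t.length with h0 | hpos
  · rw [h0]
    rw [if_pos (show _ from by push_cast; omega), if_pos (show _ from by push_cast; omega)]
  · have hc : ((((t.length : Int) - 1).toNat : Nat) : Int) = (t.length : Int) - 1 := by omega
    rw [hc]

theorem pvAlt_nonpos (t : List Int) (k : Nat) (p acc : Int) (hp : p ≤ 0) :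
    pvAlt t k p acc = acc := by
  simp only [pvAlt]
  rw [if_pos (le_trans (min_le_left _ _) hp)]

theorem pvAlt_succ_one (t : List Int) (k : Nat) (acc : Int) :
    pvAlt t (k+1) 1 acc = acc + 2 * PySem.List.pyGetD t (((k+1 : Nat)) : Int) 0 := by
  simp only [pvAlt]
  rw [show min (1:Int) (3 * (((k+1 : Nat)) : Int)) = 1 from by push_cast; omega]
  rw [if_neg (by norm_num)]
  rw [show PySem.Int.floordiv 1 3 = 0 from by decide, show PySem.Int.mod 1 3 = 1 from by decide]
  simp only [Int.toNat_zero, pvIter]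
  rw [if_neg (show ¬((1:Int) = 2) from by norm_num), if_pos (show (1:Int) ≤ 1 from by norm_num)]

theorem pvAlt_succ_two (t : List Int) (k : Nat) (acc : Int) :
    pvAlt t (k+1) 2 acc = acc + 2 * PySem.List.pyGetD t (((k+1 : Nat)) : Int) 0
      + PySem.List.pyGetD t (((k+1 : Nat)) : Int) 0
      + PySem.List.pyGetD t ((((k+1 : Nat)) : Int) - 1) 0 := by
  simp only [pvAlt]
  rw [show min (2:Int) (3 * (((k+1 : Nat)) : Int)) = 2 from by push_cast; omega]
  rw [if_neg (by norm_num)]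
  rw [show PySem.Int.floordiv 2 3 = 0 from by decide, show PySem.Int.mod 2 3 = 2 from by decide]
  simp only [Int.toNat_zero, pvIter]
  rw [if_pos (show True from trivial), if_pos (show (1:Int) ≤ 2 from by norm_num)]

theorem pvAlt_succ_ge3 (t : List Int) (k : Nat) (p acc : Int) (h3 : 3 ≤ p) :
    pvAlt t (k+1) p acc
      = pvAlt t k (p - 3) (acc + 4 * PySem.List.pyGetD t (((k+1 : Nat)) : Int) 0
          + 2 * PySem.List.pyGetD t ((((k+1 : Nat)) : Int) - 1) 0) := by
  have hm'0 : (0:Int) ≤ min (p - 3) (3 * (k : Int)) := by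
    have : (0:Int) ≤ (k : Int) := Int.natCast_nonneg k
    omega
  simp only [pvAlt]
  rw [show min p (3 * (((k+1 : Nat)) : Int)) = min (p - 3) (3 * (k : Int)) + 3 from by push_cast; omega]
  set m' := min (p - 3) (3 * (k : Int)) with hm'
  rw [if_neg (show ¬ m' + 3 ≤ 0 from by omega)]
  rw [show PySem.Int.floordiv (m' + 3) 3 = PySem.Int.floordiv m' 3 + 1 from by
        rw [PySem.Int.floordiv_eq_ediv_of_pos (by norm_num), PySem.Int.floordiv_eq_ediv_of_pos (by norm_num)]; omega]
  rw [show PySem.Int.mod (m' + 3) 3 = PySem.Int.mod m' 3 from by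
        rw [PySem.Int.mod_eq_emod_of_pos (by norm_num), PySem.Int.mod_eq_emod_of_pos (by norm_num)]; omega]
  have hq0 : 0 ≤ PySem.Int.floordiv m' 3 := by
    rw [PySem.Int.floordiv_eq_ediv_of_pos (by norm_num)]; omega
  rw [show (PySem.Int.floordiv m' 3 + 1).toNat = (PySem.Int.floordiv m' 3).toNat + 1 from by omega]
  simp only [pvIter, pvStepB]
  rw [show (((k+1 : Nat)) : Int) - 1 = (k : Int) from by push_cast; ring]
  by_cases hz : m' ≤ 0
  · have hm0 : m' = 0 := le_antisymm hz hm'0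
    rw [if_pos hz, hm0]
    rw [show PySem.Int.floordiv 0 3 = 0 from by decide, show PySem.Int.mod 0 3 = 0 from by decide]
    simp only [Int.toNat_zero, pvIter]
    rw [if_neg (show ¬((0:Int) = 2) from by norm_num), if_neg (show ¬((1:Int) ≤ 0) from by norm_num)]
  · rw [if_neg hz]

-- The greedy walk over [k, k-1, …, 1] equals B's divmod/block arithmetic.
theorem pvG_eq_pvAlt (t : List Int) (k : Nat) : ∀ (p acc : Int),
    pvG t (PySem.List.pyRange (k : Int) 0 (-1)) p acc = pvAlt t k p acc := by
  induction k with
  | zero =>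
    intro p acc
    rw [PySem.List.pyRange_neg_one_eq_nil (by norm_num)]
    simp only [pvG, pvAlt]
    rw [if_pos (le_trans (min_le_right _ _) (by norm_num))]
  | succ k ih =>
    intro p acc
    rw [PySem.List.pyRange_neg_one_cons (by exact_mod_cast Nat.succ_pos k)]
    rw [show (((k+1 : Nat)) : Int) - 1 = (k : Int) from by push_cast; ring]
    simp only [pvG]
    by_cases h3 : 3 ≤ p
    · rw [if_pos h3, ih, pvAlt_succ_ge3 t k p acc h3]
    · rw [if_neg h3]
      by_cases hp0 : p ≤ 0
      · rw [if_neg (by omega), if_neg (by omega), pvAlt_nonpos t (k+1) p acc hp0]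
      · interval_cases p
        · rw [if_neg (by norm_num), if_pos rfl, pvAlt_succ_one]
        · rw [if_pos rfl, pvAlt_succ_two]
          ring

-- A's fold is inert once the early-return flag is set.
theorem foldl_stepA_some (t : List Int) (p : Int) (L : List Int)
    (res : Int) (pair : PySem.Set (Int × Int)) (pc r : Int) :
    L.foldl (pvStepA t p) (res, pair, pc, some r) = (res, pair, pc, some r) := by
  induction L with
  | nil => rfl
  | cons i L ih =>
    rw [List.foldl_cons]
    exact ih

def pvFin (st : Int × PySem.Set (Int × Int) × Int × Option Int) : Int :=
  match st.2.2.2 with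
  | some r => r
  | none => st.1

-- step characterizations of A's loop body
theorem stepA_stop (t : List Int) (p res pc i : Int) (pair : PySem.Set (Int × Int)) (h : pc = p) :
    pvStepA t p (res, pair, pc, none) i = (res, pair, pc, some res) := by
  simp only [pvStepA]
  rw [if_pos h]

theorem stepA_dead (t : List Int) (p res pc i : Int) (pair : PySem.Set (Int × Int))
    (hne : pc ≠ p) (hge : ¬ pc < p) :
    pvStepA t p (res, pair, pc, none) i = (res, pair, pc, none) := by
  simp only [pvStepA]
  rw [if_neg hne, if_neg hge]
  rw [if_neg (show ¬ (((res, pair, pc) : Int × PySem.Set (Int × Int) × Int).2.2 < p ∧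
        (i, i - 1) ∉ ((res, pair, pc) : Int × PySem.Set (Int × Int) × Int).2.1) from fun hc => hge hc.1)]
  rw [if_neg (show ¬ (((res, pair, pc) : Int × PySem.Set (Int × Int) × Int).2.2 < p ∧
        (i - 1, i) ∉ ((res, pair, pc) : Int × PySem.Set (Int × Int) × Int).2.1) from fun hc => hge hc.1)]

theorem stepA_one (t : List Int) (p res pc i : Int) (pair : PySem.Set (Int × Int))
    (h1 : pc < p) (h2 : ¬ pc + 1 < p) :
    pvStepA t p (res, pair, pc, none) i
      = (res + 2 * PySem.List.pyGetD t i 0, PySem.Set.add pair (i, i), pc + 1, none) := by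
  simp only [pvStepA]
  rw [if_neg (show pc ≠ p from by omega), if_pos h1]
  rw [if_neg (show ¬ (((res + 2 * PySem.List.pyGetD t i 0, PySem.Set.add pair (i, i), pc + 1) :
        Int × PySem.Set (Int × Int) × Int).2.2 < p ∧
        (i, i - 1) ∉ ((res + 2 * PySem.List.pyGetD t i 0, PySem.Set.add pair (i, i), pc + 1) :
        Int × PySem.Set (Int × Int) × Int).2.1) from fun hc => h2 hc.1)]
  rw [if_neg (show ¬ (((res + 2 * PySem.List.pyGetD t i 0, PySem.Set.add pair (i, i), pc + 1) :
        Int × PySem.Set (Int × Int) × Int).2.2 < p ∧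
        (i - 1, i) ∉ ((res + 2 * PySem.List.pyGetD t i 0, PySem.Set.add pair (i, i), pc + 1) :
        Int × PySem.Set (Int × Int) × Int).2.1) from fun hc => h2 hc.1)]

theorem stepA_two (t : List Int) (p res pc i : Int) (pair : PySem.Set (Int × Int))
    (h1 : pc < p) (h2 : pc + 1 < p) (h3 : ¬ pc + 1 + 1 < p)
    (hn1 : (i, i - 1) ∉ PySem.Set.add pair (i, i)) :
    pvStepA t p (res, pair, pc, none) i
      = (res + 2 * PySem.List.pyGetD t i 0 + (PySem.List.pyGetD t i 0 + PySem.List.pyGetD t (i - 1) 0),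
         PySem.Set.add (PySem.Set.add pair (i, i)) (i, i - 1), pc + 1 + 1, none) := by
  simp only [pvStepA]
  rw [if_neg (show pc ≠ p from by omega), if_pos h1]
  rw [if_pos (show (((res + 2 * PySem.List.pyGetD t i 0, PySem.Set.add pair (i, i), pc + 1) :
        Int × PySem.Set (Int × Int) × Int).2.2 < p ∧
        (i, i - 1) ∉ ((res + 2 * PySem.List.pyGetD t i 0, PySem.Set.add pair (i, i), pc + 1) :
        Int × PySem.Set (Int × Int) × Int).2.1) from ⟨h2, hn1⟩)]
  rw [if_neg (fun hc => h3 hc.1)]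

theorem stepA_full (t : List Int) (p res pc i : Int) (pair : PySem.Set (Int × Int))
    (h1 : pc < p) (h2 : pc + 1 < p) (h3 : pc + 1 + 1 < p)
    (hn1 : (i, i - 1) ∉ PySem.Set.add pair (i, i))
    (hn2 : (i - 1, i) ∉ PySem.Set.add (PySem.Set.add pair (i, i)) (i, i - 1)) :
    pvStepA t p (res, pair, pc, none) i
      = (res + 2 * PySem.List.pyGetD t i 0 + (PySem.List.pyGetD t i 0 + PySem.List.pyGetD t (i - 1) 0)
           + (PySem.List.pyGetD t (i - 1) 0 + PySem.List.pyGetD t i 0),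
         PySem.Set.add (PySem.Set.add (PySem.Set.add pair (i, i)) (i, i - 1)) (i - 1, i),
         pc + 1 + 1 + 1, none) := by
  simp only [pvStepA]
  rw [if_neg (show pc ≠ p from by omega), if_pos h1]
  rw [if_pos (show (((res + 2 * PySem.List.pyGetD t i 0, PySem.Set.add pair (i, i), pc + 1) :
        Int × PySem.Set (Int × Int) × Int).2.2 < p ∧
        (i, i - 1) ∉ ((res + 2 * PySem.List.pyGetD t i 0, PySem.Set.add pair (i, i), pc + 1) :
        Int × PySem.Set (Int × Int) × Int).2.1) from ⟨h2, hn1⟩)]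
  rw [if_pos (show _ ∧ _ from ⟨h3, hn2⟩)]

-- A's loop over [k, …, 1] computes the greedy walk; the pair set never blocks an addition
-- (invariant: every recorded pair has component sum ≥ 2k+1).
theorem loopA_eq_pvG (t : List Int) (p : Int) (k : Nat) :
    ∀ (res : Int) (pair : PySem.Set (Int × Int)) (pc : Int),
    (∀ q ∈ pair, 2 * (k : Int) + 1 ≤ q.1 + q.2) →
    pvFin ((PySem.List.pyRange (k : Int) 0 (-1)).foldl (pvStepA t p) (res, pair, pc, none))
      = pvG t (PySem.List.pyRange (k : Int) 0 (-1)) (p - pc) res := by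
  induction k with
  | zero =>
    intro res pair pc _
    rw [PySem.List.pyRange_neg_one_eq_nil (by norm_num)]
    rfl
  | succ k ih =>
    intro res pair pc hinv
    rw [PySem.List.pyRange_neg_one_cons (by exact_mod_cast Nat.succ_pos k)]
    rw [show (((k+1 : Nat)) : Int) - 1 = (k : Int) from by push_cast; ring]
    have hinv' : ∀ q ∈ pair, 2 * ((k : Int) + 1) + 1 ≤ q.1 + q.2 := by
      intro q hq; have := hinv q hq; push_cast at this; omega
    set i : Int := ((k+1 : Nat) : Int) with hi
    have hi' : i = (k : Int) + 1 := by rw [hi]; push_cast; ring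
    rw [List.foldl_cons]
    by_cases h0 : pc = p
    · rw [stepA_stop t p res pc i pair h0, foldl_stepA_some]
      simp only [pvFin]
      rw [pvG_nonpos _ _ _ _ (by omega)]
    · by_cases hlt : pc < p
      · have hnm1 : (i, i - 1) ∉ PySem.Set.add pair (i, i) := by
          intro hmem
          rcases (PySem.Set.mem_add _ _ _).1 hmem with h | h
          · have := hinv' _ h; simp only at this; omega
          · simp only [Prod.mk.injEq] at h; omega
        have hnm2 : (i - 1, i) ∉ PySem.Set.add (PySem.Set.add pair (i, i)) (i, i - 1) := by
          intro hmem
          rcases (PySem.Set.mem_add _ _ _).1 hmem with h | h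
          · rcases (PySem.Set.mem_add _ _ _).1 h with h' | h'
            · have := hinv' _ h'; simp only at this; omega
            · simp only [Prod.mk.injEq] at h'; omega
          · simp only [Prod.mk.injEq] at h; omega
        by_cases h3 : 3 ≤ p - pc
        · rw [stepA_full t p res pc i pair hlt (by omega) (by omega) hnm1 hnm2]
          rw [ih _ _ _ (by
            intro q hq
            rcases (PySem.Set.mem_add _ _ _).1 hq with h | h
            · rcases (PySem.Set.mem_add _ _ _).1 h with h' | h'
              · rcases (PySem.Set.mem_add _ _ _).1 h' with h'' | h''
                · have := hinv' _ h''; omega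
                · rw [h'']; simp only [hi']; omega
              · rw [h']; simp only [hi']; omega
            · rw [h]; simp only [hi']; omega)]
          simp only [pvG]
          rw [if_pos h3]
          rw [show p - (pc + 1 + 1 + 1) = p - pc - 3 from by ring]
          congr 1
          ring
        · by_cases h2 : p - pc = 2
          · rw [stepA_two t p res pc i pair hlt (by omega) (by omega) hnm1]
            rw [ih _ _ _ (by
              intro q hq
              rcases (PySem.Set.mem_add _ _ _).1 hq with h | h
              · rcases (PySem.Set.mem_add _ _ _).1 h with h' | h'
                · have := hinv' _ h'; omega
                · rw [h']; simp only [hi']; omega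
              · rw [h]; simp only [hi']; omega)]
            rw [pvG_nonpos _ _ _ _ (by omega)]
            simp only [pvG]
            rw [if_neg (by omega), if_pos h2]
            ring
          · have h1 : p - pc = 1 := by omega
            rw [stepA_one t p res pc i pair hlt (by omega)]
            rw [ih _ _ _ (by
              intro q hq
              rcases (PySem.Set.mem_add _ _ _).1 hq with h | h
              · have := hinv' _ h; omega
              · rw [h]; simp only [hi']; omega)]
            rw [pvG_nonpos _ _ _ _ (by omega)]
            simp only [pvG]
            rw [if_neg (by omega), if_neg (by omega), if_pos h1]
      · rw [stepA_dead t p res pc i pair h0 hlt]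
        rw [ih _ _ _ (by intro q hq; have := hinv' _ hq; omega)]
        rw [pvG_nonpos _ _ _ _ (by omega), pvG_nonpos _ _ _ _ (by omega)]

-- ===== VERDICT (by name: the statement is the Claim_ definition above) =====
theorem maxTransferRate_spec : Claim_equal_maxTransferRate := by
  intro throughput p _hdom
  unfold Spec_maxTransferRate
  rw [alt_eq_pvAlt]
  set t := PySem.List.sorted throughput (fun x => x) false with ht
  have hlen : t.length = throughput.length := PySem.List.length_sorted ..
  simp only [maxTransferRate, ← ht, hlen]
  rcases Nat.eq_zero_or_pos throughput.length with h0 | hpos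
  · rw [h0]
    rw [show ((0:Nat):Int) - 1 = -1 from by decide]
    rw [PySem.List.pyRange_neg_one_eq_nil (by norm_num)]
    simp only [List.foldl_nil]
    rw [show ((-1:Int)).toNat = 0 from by decide]
    simp only [pvAlt]
    rw [if_pos (le_trans (min_le_right _ _) (by norm_num))]
  · obtain ⟨k, hk⟩ : ∃ k : Nat, throughput.length = k + 1 :=
      ⟨throughput.length - 1, by omega⟩
    rw [hk]
    rw [show (((k+1 : Nat)) : Int) - 1 = (k : Int) from by push_cast; ring]
    rw [show ((k : Int)).toNat = k from by omega]
    have hA := loopA_eq_pvG t p k 0 PySem.Set.empty 0 (by intro q hq; simp [PySem.Set.empty] at hq)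
    simp only [pvFin] at hA
    rw [show p - 0 = p from by ring] at hA
    rw [← pvG_eq_pvAlt]
    exact hA
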